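-- pv_equiv track=rewrite | github.com/Adronz/Genome_assembler | Spectrum_to_seq.py | find_start_vertex
-- ===== SOURCE A (Python) =====
-- from typing import List, Dict, Iterable
--
-- def find_start_vertex(g: Dict[int, List[int]]) -> int:
--     # Calculate in-degrees
--     in_degrees = {u: 0 for u in g}
--     for u in g:
--         for v in g[u]:
--             in_degrees[v] = in_degrees.get(v, 0) + 1
--
--     # Determine the start vertex
--     start_vertex = None
--     for u in g:
--         if len(g[u]) - in_degrees.get(u, 0) == 1:
--             return u
--     for u in g:
--         if len(g[u]) > in_degrees.get(u, 0):
--             return u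
--     return next(iter(g))
-- ===== SOURCE B (Python) =====
-- def find_start_vertex(g):
--     # No in-degree dict at all: flatten all edges once, then a single scan over the
--     # keys computing each balance via edges.count and keeping the first key of
--     # minimal rank (rank 0: balance == 1, rank 1: balance > 0, rank 2: otherwise),
--     # breaking as soon as a rank-0 key is found.
--     edges = [v for vs in g.values() for v in vs]
--     best = None
--     for u, vs in g.items():
--         b = len(vs) - edges.count(u)
--         rank = 0 if b == 1 else (1 if b > 0 else 2)
--         if best is None or rank < best[0]:
--             best = (rank, u)
--             if rank == 0:
--                 break
--     return best[1]
-- ===== Notes on version B (the rewrite author's own statement) =====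
-- stated objective: alternative
-- what changed: B drops A's in-degree dictionary and its two staged prioritized key scans entirely: it flattens all edges into one list, computes each key's balance on the fly with list.count, and selects the answer in a single scan as the first key of minimal rank (0 for balance==1, 1 for balance>0, 2 otherwise) with an early break on rank 0.
import Mathlib
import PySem

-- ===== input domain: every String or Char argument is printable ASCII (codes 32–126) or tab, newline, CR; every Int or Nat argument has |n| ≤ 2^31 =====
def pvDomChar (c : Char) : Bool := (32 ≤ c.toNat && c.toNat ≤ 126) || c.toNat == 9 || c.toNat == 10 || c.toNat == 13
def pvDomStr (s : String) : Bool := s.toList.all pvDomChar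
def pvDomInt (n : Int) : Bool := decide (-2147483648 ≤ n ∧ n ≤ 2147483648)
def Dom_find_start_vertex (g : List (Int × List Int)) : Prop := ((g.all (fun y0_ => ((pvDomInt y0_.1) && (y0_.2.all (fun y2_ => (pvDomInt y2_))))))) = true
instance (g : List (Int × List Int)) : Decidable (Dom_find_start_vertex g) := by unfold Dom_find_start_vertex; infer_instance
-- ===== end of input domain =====

-- B replaces A's in-degree dictionary and two staged prioritized key scans by a
-- flattened edge list, per-key balances via list.count, and ONE minimal-rank scan
-- with an early break (objective: alternative; not faster).

-- ===== PORT A =====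
def find_start_vertex (g : List (Int × List Int)) : Int :=
  -- in_degrees = {u: 0 for u in g}
  let ind0 : PySem.Dict Int Int := g.foldl (fun d p => d.insert p.1 0) PySem.Dict.empty
  -- for u in g: for v in g[u]: in_degrees[v] = in_degrees.get(v, 0) + 1
  let ind : PySem.Dict Int Int :=
    g.foldl (fun d p => p.2.foldl (fun d v => d.insert v (d.getD v 0 + 1)) d) ind0
  -- for u in g: if len(g[u]) - in_degrees.get(u, 0) == 1: return u
  -- for u in g: if len(g[u]) > in_degrees.get(u, 0): return u
  -- next(iter(g)): first key; StopIteration on the empty dict is excluded by Pre_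
  ((g.find? (fun p => (PySem.List.len p.2 - ind.getD p.1 0) == 1)).map (·.1)).getD
    (((g.find? (fun p => decide (ind.getD p.1 0 < PySem.List.len p.2))).map (·.1)).getD
      ((g.headD (0, [])).1))

-- ===== PORT B =====
-- B's for-loop with its accumulator `best` and its break, as structural recursion
def pvScanB (edges : List Int) : List (Int × List Int) → Option (Int × Int) → Option (Int × Int)
  | [], best => best
  | p :: t, best =>
    -- b = len(vs) - edges.count(u); rank = 0 if b == 1 else (1 if b > 0 else 2)
    let b : Int := PySem.List.len p.2 - PySem.List.count edges p.1
    let rank : Int := if b == 1 then 0 else if decide (0 < b) then 1 else 2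
    -- if best is None or rank < best[0]: best = (rank, u); if rank == 0: break
    if (match best with | none => true | some (r, _) => decide (rank < r)) then
      if rank == 0 then some (rank, p.1)
      else pvScanB edges t (some (rank, p.1))
    else pvScanB edges t best

def find_start_vertex_alt (g : List (Int × List Int)) : Int :=
  -- edges = [v for vs in g.values() for v in vs]
  let edges : List Int := g.flatMap (·.2)
  -- return best[1]; TypeError on the empty dict (best is None) is excluded by Pre_
  match pvScanB edges g none with
  | some (_, u) => u
  | none => 0

-- ===== PRECONDITION & SPEC =====
-- Pre_ excludes only the empty dict, on which A's next(iter(g)) raises StopIteration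
-- (and B's best[1] raises TypeError).
def Pre_find_start_vertex (g : List (Int × List Int)) : Prop := g ≠ []
instance (g : List (Int × List Int)) : Decidable (Pre_find_start_vertex g) := by
  unfold Pre_find_start_vertex; infer_instance
def pvWitness_find_start_vertex : (List (Int × List Int)) := [(1, [2]), (2, [])]
def Spec_find_start_vertex (g : List (Int × List Int)) (out : Int) : Prop := out = find_start_vertex_alt g
instance (g : List (Int × List Int)) (out : Int) : Decidable (Spec_find_start_vertex g out) := by unfold Spec_find_start_vertex; infer_instance

-- ===== CLAIM (what is proved, stated in full; the proofs are below) =====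
def Claim_equal_find_start_vertex : Prop := ∀ (g : List (Int × List Int)), Dom_find_start_vertex g → Pre_find_start_vertex g → Spec_find_start_vertex g (find_start_vertex g)

-- ===== LEMMAS AND PROOFS =====

-- the rank B assigns to an item
def pvRnk (edges : List Int) (p : Int × List Int) : Int :=
  let b : Int := PySem.List.len p.2 - PySem.List.count edges p.1
  if b == 1 then 0 else if decide (0 < b) then 1 else 2

-- A's zero-initialisation leaves every getD _ 0 at 0
theorem pv_ind0_getD (g : List (Int × List Int)) (d : PySem.Dict Int Int)
    (h : ∀ u, d.getD u 0 = 0) (u : Int) :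
    (g.foldl (fun d p => d.insert p.1 0) d).getD u 0 = 0 := by
  induction g generalizing d with
  | nil => exact h u
  | cons p t ih =>
    simp only [List.foldl_cons]
    exact ih _ (fun w => by rw [PySem.Dict.getD_insert]; split <;> simp [h])

-- A's in-degree dict computes the count over the flattened edges
theorem pv_ind_getD (g : List (Int × List Int)) (d : PySem.Dict Int Int) (u : Int) :
    (g.foldl (fun d p => p.2.foldl (fun d v => d.insert v (d.getD v 0 + 1)) d) d).getD u 0
      = d.getD u 0 + ((g.flatMap (·.2)).count u : Int) := by
  induction g generalizing d with
  | nil => simp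
  | cons p t ih =>
    simp only [List.foldl_cons]
    rw [ih, PySem.Dict.getD_foldl_insert_add_one]
    simp only [List.flatMap_cons, List.count_append]
    push_cast
    ring

-- find? only depends on the predicate on members
theorem pv_find?_congr {α : Type} (l : List α) (f q : α → Bool)
    (h : ∀ x ∈ l, f x = q x) : l.find? f = l.find? q := by
  induction l with
  | nil => rfl
  | cons x t ih =>
    simp only [List.find?_cons, h x (List.mem_cons_self ..)]
    split <;> [rfl; exact ih (fun y hy => h y (List.mem_cons_of_mem _ hy))]

-- with accumulator (1, u), only a rank-0 item updates (and breaks)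
theorem pv_scan_acc1 (edges : List Int) (l : List (Int × List Int)) (u : Int) :
    pvScanB edges l (some (1, u))
      = match l.find? (fun p => pvRnk edges p == 0) with
        | some p => some (0, p.1)
        | none => some (1, u) := by
  induction l with
  | nil => rfl
  | cons p t ih =>
    rw [pvScanB, List.find?_cons]
    by_cases hb1 : ((p.2.length : Int) - (List.count p.1 edges : Int) = 1)
    · simp [pvRnk, PySem.List.len, PySem.List.count_eq, hb1]
    · by_cases hbp : List.count p.1 edges < p.2.length
      · simp [pvRnk, PySem.List.len, PySem.List.count_eq, hb1, hbp, ih]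
      · simp [pvRnk, PySem.List.len, PySem.List.count_eq, hb1, hbp, ih]

-- with accumulator (2, u): first rank-0 key, else first rank-≤1 key, else u
theorem pv_scan_acc2 (edges : List Int) (l : List (Int × List Int)) (u : Int) :
    (match pvScanB edges l (some (2, u)) with | some (_, w) => w | none => 0)
      = ((l.find? (fun p => pvRnk edges p == 0)).map (·.1)).getD
          (((l.find? (fun p => decide (pvRnk edges p ≤ 1))).map (·.1)).getD u) := by
  induction l generalizing u with
  | nil => rfl
  | cons p t ih =>
    rw [pvScanB, List.find?_cons, List.find?_cons]
    by_cases hb1 : ((p.2.length : Int) - (List.count p.1 edges : Int) = 1)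
    · simp [pvRnk, PySem.List.len, PySem.List.count_eq, hb1]
    · by_cases hbp : List.count p.1 edges < p.2.length
      · have hbi : (0:Int) < (p.2.length : Int) - (List.count p.1 edges : Int) := by omega
        cases hf : t.find? (fun q =>
            ((if ((q.2.length : Int) - (List.count q.1 edges : Int) = 1) then (0:Int)
              else if List.count q.1 edges < q.2.length then 1 else 2) == 0)) <;>
          simp [pvRnk, PySem.List.len, PySem.List.count_eq, hb1, hbp, pv_scan_acc1, hf]
      · simp [pvRnk, PySem.List.len, PySem.List.count_eq, hb1, hbp, ih]

-- the full scan from None: first rank-0 key, else first rank-≤1 key, else head key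
theorem pv_scan_none (edges : List Int) (p : Int × List Int) (t : List (Int × List Int)) :
    (match pvScanB edges (p :: t) none with | some (_, w) => w | none => 0)
      = (((p :: t).find? (fun q => pvRnk edges q == 0)).map (·.1)).getD
          ((((p :: t).find? (fun q => decide (pvRnk edges q ≤ 1))).map (·.1)).getD p.1) := by
  rw [pvScanB, List.find?_cons, List.find?_cons]
  by_cases hb1 : ((p.2.length : Int) - (List.count p.1 edges : Int) = 1)
  · simp [pvRnk, PySem.List.len, PySem.List.count_eq, hb1]
  · by_cases hbp : List.count p.1 edges < p.2.length
    · have hbi : (0:Int) < (p.2.length : Int) - (List.count p.1 edges : Int) := by omega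
      cases hf : t.find? (fun q =>
          ((if ((q.2.length : Int) - (List.count q.1 edges : Int) = 1) then (0:Int)
            else if List.count q.1 edges < q.2.length then 1 else 2) == 0)) <;>
        simp [pvRnk, PySem.List.len, PySem.List.count_eq, hb1, hbp, pv_scan_acc1, hf]
    · simp [pvRnk, PySem.List.len, PySem.List.count_eq, hb1, hbp, pv_scan_acc2]

-- ===== VERDICT (by name: the statement is the Claim_ definition above) =====
theorem find_start_vertex_spec : Claim_equal_find_start_vertex := by
  intro g _ hpre
  unfold Spec_find_start_vertex find_start_vertex find_start_vertex_alt
  simp only []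
  obtain ⟨p, t, rfl⟩ : ∃ p t, g = p :: t := by
    cases g with | nil => exact absurd rfl hpre | cons p t => exact ⟨p, t, rfl⟩
  rw [pv_scan_none]
  have hind : ∀ (u : Int),
      ((p :: t).foldl (fun d q => q.2.foldl (fun d v => d.insert v (d.getD v 0 + 1)) d)
        ((p :: t).foldl (fun d q => d.insert q.1 0) PySem.Dict.empty)).getD u 0
        = (((p :: t).flatMap (·.2)).count u : Int) := by
    intro u
    rw [pv_ind_getD, pv_ind0_getD _ _ (fun u => by simp)]
    ring
  have h1 : (p :: t).find? (fun q => (PySem.List.len q.2 -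
      ((p :: t).foldl (fun d q => q.2.foldl (fun d v => d.insert v (d.getD v 0 + 1)) d)
        ((p :: t).foldl (fun d q => d.insert q.1 0) PySem.Dict.empty)).getD q.1 0) == 1)
      = (p :: t).find? (fun q => pvRnk ((p :: t).flatMap (·.2)) q == 0) := by
    apply pv_find?_congr
    intro q _
    rw [hind q.1]
    simp [pvRnk, PySem.List.count_eq]
    split_ifs with h <;> simp_all
  have h2 : (p :: t).find? (fun q => decide
      (((p :: t).foldl (fun d q => q.2.foldl (fun d v => d.insert v (d.getD v 0 + 1)) d)
        ((p :: t).foldl (fun d q => d.insert q.1 0) PySem.Dict.empty)).getD q.1 0 < PySem.List.len q.2))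
      = (p :: t).find? (fun q => decide (pvRnk ((p :: t).flatMap (·.2)) q ≤ 1)) := by
    apply pv_find?_congr
    intro q _
    rw [hind q.1, decide_eq_decide]
    simp only [pvRnk, PySem.List.len, PySem.List.count_eq]
    split_ifs with ha hb <;>
      [ (simp only [beq_iff_eq] at ha; constructor <;> intro <;> omega);
        (simp only [beq_iff_eq] at ha; simp only [decide_eq_true_eq] at hb; constructor <;> intro <;> omega);
        (simp only [beq_iff_eq] at ha; simp only [decide_eq_true_eq] at hb; constructor <;> intro <;> omega) ]
  rw [h1, h2]
  rfl
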